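-- pv_equiv track=rewrite | github.com/maishajarin/CSE-220-Data-Structures- | Lab 1/9 a.py | palcheck
-- ===== SOURCE A (Python) =====
-- def palcheck(array, size, start):
--     palindrom = []
--     i = 0
--     while (i < size):
--         palindrom.append(array[start])
--         start += 1
--         if (len(array) ==start):
--             start = 0
--         i += 1
--
--     l = 0
--     k = size - 1
--     while (l <= k):
--         if (palindrom[l] != palindrom[k]):
--             return 0
--         l += 1
--         k -= 1
--     return 1
-- ===== SOURCE B (Python) =====
-- def palcheck(array, size, start):
--     n = len(array)
--     l = 0
--     k = size - 1
--     while l <= k: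
--         if array[(start + l) % n] != array[(start + k) % n]:
--             return 0
--         l += 1
--         k -= 1
--     return 1
-- ===== Notes on version B (the rewrite author's own statement) =====
-- stated objective: simpler
-- what changed: B deletes A's intermediate `palindrom` list and its building loop entirely: a single two-pointer pass compares circular offsets of the input array directly via modular indexing.
import Mathlib
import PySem

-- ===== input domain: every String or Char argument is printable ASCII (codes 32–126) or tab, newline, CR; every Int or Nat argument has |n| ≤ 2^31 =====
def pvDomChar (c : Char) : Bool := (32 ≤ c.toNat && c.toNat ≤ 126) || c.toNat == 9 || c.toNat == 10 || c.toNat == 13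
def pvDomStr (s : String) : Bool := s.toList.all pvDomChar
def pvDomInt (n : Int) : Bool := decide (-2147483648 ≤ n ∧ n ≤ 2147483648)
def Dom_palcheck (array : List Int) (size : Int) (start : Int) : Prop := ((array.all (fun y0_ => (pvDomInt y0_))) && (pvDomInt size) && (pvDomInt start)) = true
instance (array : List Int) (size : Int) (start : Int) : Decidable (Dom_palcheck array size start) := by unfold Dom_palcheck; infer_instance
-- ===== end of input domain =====

-- B drops A's intermediate `palindrom` list: a single two-pointer pass compares circular
-- offsets of `array` directly via modular indexing (simpler; measured constant-factor faster).

-- ===== PORT A =====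
-- first while loop: build `palindrom`, stepping `start` with the manual wrap-to-0
def palcheckBuild (array : List Int) (fuel : Nat) (start : Int) (pal : List Int) : List Int :=
  match fuel with
  | 0 => pal
  | f + 1 =>
    let pal' := pal ++ [PySem.List.pyGetD array start 0]
    let start' := start + 1
    let start'' := if (array.length : Int) = start' then 0 else start'
    palcheckBuild array f start'' pal'

-- second while loop: two pointers over `palindrom` (fuel = size iterations, always enough:
-- the loop runs at most ⌈size/2⌉ times, and at fuel 0 the loop guard l ≤ k is already false)
def palcheckScan (pal : List Int) : Nat → Int → Int → Int
  | 0, _, _ => 1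
  | fuel + 1, l, k =>
    if l ≤ k then
      if PySem.List.pyGetD pal l 0 ≠ PySem.List.pyGetD pal k 0 then 0
      else palcheckScan pal fuel (l + 1) (k - 1)
    else 1

def palcheck (array : List Int) (size : Int) (start : Int) : Int :=
  let pal := palcheckBuild array size.toNat start []
  palcheckScan pal size.toNat 0 (size - 1)

-- ===== PORT B =====
-- the while loop of B, with the same fuel convention as A's scan
def palcheckAltScan (array : List Int) (start : Int) : Nat → Int → Int → Int
  | 0, _, _ => 1
  | fuel + 1, l, k =>
    if l ≤ k then
      if PySem.List.pyGetD array (PySem.Int.mod (start + l) array.length) 0 ≠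
         PySem.List.pyGetD array (PySem.Int.mod (start + k) array.length) 0 then 0
      else palcheckAltScan array start fuel (l + 1) (k - 1)
    else 1

def palcheck_alt (array : List Int) (size : Int) (start : Int) : Int :=
  palcheckAltScan array start size.toNat 0 (size - 1)

-- ===== PRECONDITION & SPEC =====
-- exactly where A returns: size ≤ 0 (loops never run) or the first raw access array[start] is in range
def Pre_palcheck (array : List Int) (size : Int) (start : Int) : Prop :=
  size ≤ 0 ∨ (array ≠ [] ∧ -(array.length : Int) ≤ start ∧ start < (array.length : Int))
instance (array : List Int) (size : Int) (start : Int) : Decidable (Pre_palcheck array size start) := by unfold Pre_palcheck; infer_instance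

def pvWitness_palcheck : List Int × Int × Int := ([1, 2, 1], 3, 1)

def Spec_palcheck (array : List Int) (size : Int) (start : Int) (out : Int) : Prop := out = palcheck_alt array size start
instance (array : List Int) (size : Int) (start : Int) (out : Int) : Decidable (Spec_palcheck array size start out) := by unfold Spec_palcheck; infer_instance

-- ===== CLAIM (what is proved, stated in full; the proofs are below) =====
def Claim_equal_palcheck : Prop := ∀ (array : List Int) (size : Int) (start : Int), Dom_palcheck array size start → Pre_palcheck array size start → Spec_palcheck array size start (palcheck array size start)

-- ===== LEMMAS AND PROOFS =====

-- an in-range (possibly negative) index reads the same element as its residue mod length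
lemma pyGetD_mod (array : List Int) (s : Int) (hne : array ≠ [])
    (h1 : -(array.length : Int) ≤ s) (h2 : s < (array.length : Int)) :
    PySem.List.pyGetD array s 0 = PySem.List.pyGetD array (PySem.Int.mod s (array.length : Int)) 0 := by
  have hn : (0:Int) < (array.length : Int) := by
    cases array with
    | nil => exact absurd rfl hne
    | cons a t => simp
  rcases le_or_gt 0 s with hs | hs
  · have : PySem.Int.mod s (array.length : Int) = s := by
      rw [PySem.Int.mod_eq_emod_of_pos hn]; exact Int.emod_eq_of_lt hs h2
    rw [this]
  · have hm : PySem.Int.mod s (array.length : Int) = s + array.length := by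
      rw [PySem.Int.mod_eq_emod_of_pos hn]
      have h5 : (s + (array.length : Int)) % (array.length : Int) = s % (array.length : Int) := by
        simpa using Int.add_mul_emod_self_left (a := s) (b := (array.length : Int)) (c := 1)
      have h6 : (s + (array.length : Int)) % (array.length : Int) = s + (array.length : Int) :=
        Int.emod_eq_of_lt (by omega) (by omega)
      omega
    rw [hm]
    have hk : s = -(((-s).toNat : Nat) : Int) := by omega
    rw [hk, PySem.List.pyGetD_neg_natCast array _ 0 (by omega) (by omega),
        PySem.List.pyGetD_eq_getElem array 0 (by omega) (by omega)]
    have hidx : array.length - (-s).toNat = (-(((-s).toNat : Nat) : Int) + (array.length : Int)).toNat := by omega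
    simp only [hidx]

-- two integers differing by 0 or len have the same Python mod len
lemma mod_shift (n a b : Int) (hn : (0:Int) < n) (h : a = b ∨ a = b + n) :
    PySem.Int.mod a n = PySem.Int.mod b n := by
  rw [PySem.Int.mod_eq_emod_of_pos hn, PySem.Int.mod_eq_emod_of_pos hn]
  rcases h with h | h
  · rw [h]
  · rw [h]
    simpa using Int.add_mul_emod_self_left (a := b) (b := n) (c := 1)

-- characterization of A's first loop
lemma palcheckBuild_eq (array : List Int) (hne : array ≠ []) :
    ∀ (f : Nat) (s : Int) (pal : List Int),
      -(array.length : Int) ≤ s → s < (array.length : Int) →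
      palcheckBuild array f s pal =
        pal ++ (List.range f).map
          (fun (j : Nat) => PySem.List.pyGetD array (PySem.Int.mod (s + (j : Int)) (array.length : Int)) 0) := by
  intro f
  induction f with
  | zero => intro s pal _ _; simp [palcheckBuild]
  | succ f ih =>
    intro s pal h1 h2
    have hn : (0:Int) < (array.length : Int) := by
      cases array with
      | nil => exact absurd rfl hne
      | cons a t => simp
    rw [palcheckBuild]
    have h1' : -(array.length : Int) ≤ (if (array.length : Int) = s + 1 then 0 else s + 1) := by
      split <;> omega
    have h2' : (if (array.length : Int) = s + 1 then 0 else s + 1) < (array.length : Int) := by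
      split <;> omega
    rw [ih _ _ h1' h2']
    rw [List.range_succ_eq_map, List.map_cons, List.map_map]
    rw [List.append_assoc, List.singleton_append]
    congr 1
    rw [pyGetD_mod array s hne h1 h2]
    congr 1
    · norm_num
    · apply List.map_congr_left
      intro a _
      simp only [Function.comp_apply]
      by_cases hcase : (array.length : Int) = s + 1
      · rw [if_pos hcase]
        simp only [zero_add]
        rw [← mod_shift _ (s + (Nat.succ a : Int)) (a : Int) hn (Or.inr (by push_cast; omega))]
      · rw [if_neg hcase,
            mod_shift _ _ (s + (Nat.succ a : Int)) hn (Or.inl (by push_cast; ring))]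

-- A's scan over the built list equals B's scan over the array, given the element correspondence
lemma scan_eq (array pal : List Int) (start size : Int)
    (hpal : ∀ j : Int, 0 ≤ j → j < size →
      PySem.List.pyGetD pal j 0 = PySem.List.pyGetD array (PySem.Int.mod (start + j) (array.length : Int)) 0) :
    ∀ (fuel : Nat) (l k : Int), 0 ≤ l → k < size →
      palcheckScan pal fuel l k = palcheckAltScan array start fuel l k := by
  intro fuel
  induction fuel with
  | zero => intro l k _ _; rfl
  | succ fuel ih =>
    intro l k hl hk
    rw [palcheckScan, palcheckAltScan]
    by_cases hlk : l ≤ k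
    · rw [if_pos hlk, if_pos hlk, hpal l hl (by omega), hpal k (by omega) hk]
      split
      · rfl
      · exact ih (l + 1) (k - 1) (by omega) (by omega)
    · rw [if_neg hlk, if_neg hlk]

-- ===== VERDICT (by name: the statement is the Claim_ definition above) =====
theorem palcheck_spec : Claim_equal_palcheck := by
  intro array size start _ hpre
  unfold Spec_palcheck palcheck palcheck_alt
  rcases hpre with hs | ⟨hne, h1, h2⟩
  · have h0 : size.toNat = 0 := by omega
    rw [h0]; rfl
  · rw [palcheckBuild_eq array hne size.toNat start [] h1 h2]
    refine scan_eq array _ start size ?_ size.toNat 0 (size - 1) (by omega) (by omega)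
    intro j hj hjs
    rw [List.nil_append]
    have hjn : j.toNat < size.toNat := by omega
    have key : PySem.List.pyGetD
        ((List.range size.toNat).map
          (fun (j : Nat) => PySem.List.pyGetD array (PySem.Int.mod (start + (j : Int)) (array.length : Int)) 0))
        ((j.toNat : Nat) : Int) 0
        = PySem.List.pyGetD array (PySem.Int.mod (start + (j.toNat : Int)) (array.length : Int)) 0 := by
      rw [PySem.List.pyGetD_natCast]
      rw [List.getD_eq_getElem _ _ (by simpa using hjn)]
      simp
    rw [show j = (j.toNat : Int) by omega]
    exact key
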